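-- pv_equiv track=rewrite | github.com/seeuda/climate-budget-app | app.py | prune_invalid_selections
-- ===== SOURCE A (Python) =====
-- def prune_invalid_selections(selected_items, item_budgets, valid_labels):
--     valid_item_budgets = [ib for ib in item_budgets if ib.get("label") in valid_labels]
--     valid_selected_items = [label for label in selected_items if label in valid_labels]
--     removed_labels = [
--         label for label in selected_items
--         if label not in valid_labels
--     ]
--     return valid_selected_items, valid_item_budgets, removed_labels
-- ===== SOURCE B (Python) =====
-- def prune_invalid_selections(selected_items, item_budgets, valid_labels):
--     valid = set(valid_labels)
--     kept = [label for label in selected_items if label in valid]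
--     # removed = selected_items minus the kept subsequence, by a two-pointer scan:
--     # no membership test is needed, since kept is exactly the valid subsequence.
--     removed = []
--     i = 0
--     for label in selected_items:
--         if i < len(kept) and kept[i] == label:
--             i += 1
--         else:
--             removed.append(label)
--     budgets = [ib for ib in item_budgets if ib.get("label") in valid]
--     return kept, budgets, removed
-- ===== Notes on version B (the rewrite author's own statement) =====
-- stated objective: faster
-- what changed: Membership tests go through a precomputed hash set, and the removed list is no longer produced by a second membership filter: it is derived by a two-pointer subtraction of the kept subsequence from selected_items.
import Mathlib
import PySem

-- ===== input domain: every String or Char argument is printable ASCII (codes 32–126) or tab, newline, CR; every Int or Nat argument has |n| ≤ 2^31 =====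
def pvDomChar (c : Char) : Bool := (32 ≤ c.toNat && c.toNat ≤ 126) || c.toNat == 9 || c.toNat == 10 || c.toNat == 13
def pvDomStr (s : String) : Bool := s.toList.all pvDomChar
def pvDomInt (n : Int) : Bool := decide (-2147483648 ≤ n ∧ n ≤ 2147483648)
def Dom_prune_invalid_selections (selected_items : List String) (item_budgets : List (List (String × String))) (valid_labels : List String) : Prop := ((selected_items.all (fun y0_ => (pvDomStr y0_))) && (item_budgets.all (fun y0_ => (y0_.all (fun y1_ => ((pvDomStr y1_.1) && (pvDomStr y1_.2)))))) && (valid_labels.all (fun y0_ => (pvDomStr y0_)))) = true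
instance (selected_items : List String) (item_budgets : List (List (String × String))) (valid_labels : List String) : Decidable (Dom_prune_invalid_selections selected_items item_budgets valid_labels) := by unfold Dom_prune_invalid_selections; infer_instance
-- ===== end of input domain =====

-- B uses a hash set for membership and derives the removed list by two-pointer subtraction of the kept subsequence instead of a second membership filter; same results, same order.


-- ===== PORT A =====
-- ib.get("label"): dict lookup, None if absent
def pvGetLabel (ib : List (String × String)) : Option String :=
  (PySem.Dict.ofList ib).get? "label"

def prune_invalid_selections (selected_items : List String) (item_budgets : List (List (String × String))) (valid_labels : List String) : List String × (List (List (String × String))) × List String :=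
  let valid_item_budgets := item_budgets.filter (fun ib =>
    match pvGetLabel ib with
    | some v => valid_labels.contains v
    | none => false)
  let valid_selected_items := selected_items.filter (fun label => valid_labels.contains label)
  let removed_labels := selected_items.filter (fun label => !(valid_labels.contains label))
  (valid_selected_items, valid_item_budgets, removed_labels)

-- ===== PORT B =====
-- Python's `i < len(kept) and kept[i] == label` (i : Nat, never negative) is exactly `kept.get? i == some label`.
def prune_invalid_selections_alt (selected_items : List String) (item_budgets : List (List (String × String))) (valid_labels : List String) : List String × (List (List (String × String))) × List String :=
  let valid : PySem.Set String := PySem.Set.ofList valid_labels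
  let kept := selected_items.filter (fun label => valid.contains label)
  let fin := selected_items.foldl (fun (acc : Nat × List String) label =>
    if kept[acc.1]? == some label then (acc.1 + 1, acc.2) else (acc.1, acc.2 ++ [label]))
    (0, [])
  let budgets := item_budgets.filter (fun ib =>
    match pvGetLabel ib with
    | some v => valid.contains v
    | none => false)
  (kept, budgets, fin.2)

-- ===== PRECONDITION & SPEC =====
def Spec_prune_invalid_selections (selected_items : List String) (item_budgets : List (List (String × String))) (valid_labels : List String) (out : List String × (List (List (String × String))) × List String) : Prop := out = prune_invalid_selections_alt selected_items item_budgets valid_labels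
instance (selected_items : List String) (item_budgets : List (List (String × String))) (valid_labels : List String) (out : List String × (List (List (String × String))) × List String) : Decidable (Spec_prune_invalid_selections selected_items item_budgets valid_labels out) := by unfold Spec_prune_invalid_selections; infer_instance

-- ===== CLAIM (what is proved, stated in full; the proofs are below) =====
def Claim_equal_prune_invalid_selections : Prop := ∀ (selected_items : List String) (item_budgets : List (List (String × String))) (valid_labels : List String), Dom_prune_invalid_selections selected_items item_budgets valid_labels → Spec_prune_invalid_selections selected_items item_budgets valid_labels (prune_invalid_selections selected_items item_budgets valid_labels)

-- ===== LEMMAS AND PROOFS =====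

lemma pvSetContains_eq (vl : List String) (x : String) :
    (PySem.Set.ofList vl).contains x = vl.contains x := by
  simp [pysem]

-- The two-pointer subtraction of the kept subsequence yields exactly the complementary filter.
lemma pvTwoPointer (p : String → Bool) (K : List String) :
    ∀ (xs A rm : List String), K = A ++ xs.filter p →
    xs.foldl (fun (acc : Nat × List String) l =>
        if K[acc.1]? == some l then (acc.1 + 1, acc.2) else (acc.1, acc.2 ++ [l]))
      (A.length, rm)
    = (A.length + (xs.filter p).length, rm ++ xs.filter (fun l => !(p l))) := by
  intro xs
  induction xs with
  | nil => intro A rm _; simp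
  | cons x xs ih =>
    intro A rm hK
    by_cases hp : p x = true
    · have hget : K[A.length]? = some x := by
        subst hK; simp [hp]
      have := ih (A ++ [x]) rm (by simp [hK, hp])
      simp only [List.length_append, List.length_cons, List.length_nil, Nat.zero_add] at this
      simp only [List.foldl_cons, hget, beq_self_eq_true, if_true]
      rw [this]
      simp [hp]
      omega
    · have hget : K[A.length]? ≠ some x := by
        subst hK
        rw [List.getElem?_append_right (by omega), Nat.sub_self]
        cases hf : (x :: xs).filter p with
        | nil => simp
        | cons y ys =>
          have hy : p y = true := List.of_mem_filter (hf ▸ List.mem_cons_self ..)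
          have hne : y ≠ x := fun h => by rw [h] at hy; exact hp hy
          simp [hne]
      have hb : (K[A.length]? == some x) = false := by simpa using hget
      have := ih A (rm ++ [x]) (by simp [hK, hp])
      simp only [List.foldl_cons, hb, Bool.false_eq_true, if_false]
      rw [this]
      simp [hp]

-- ===== VERDICT (by name: the statement is the Claim_ definition above) =====
theorem prune_invalid_selections_spec : Claim_equal_prune_invalid_selections := by
  intro si ibs vl _
  unfold Spec_prune_invalid_selections prune_invalid_selections prune_invalid_selections_alt
  have hc : ∀ x, (PySem.Set.ofList vl).contains x = vl.contains x := pvSetContains_eq vl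
  simp only [hc]
  have h := pvTwoPointer (fun l => vl.contains l) (si.filter (fun l => vl.contains l)) si [] [] (by simp)
  simp only [List.length_nil] at h
  rw [h]; simp
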